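-- pv_equiv track=rewrite | github.com/Keertana7/pulsecommerce | backend/main.py | analyze_user
-- ===== SOURCE A (Python) =====
-- def analyze_user(events):
--     views = [e for e in events if e.get("type") == "view"]
--     cart = [e for e in events if e.get("type") == "add_to_cart"]
--     searches = [e for e in events if e.get("type") == "search"]
--
--     if len(cart) > 0:
--         return "cart_abandoned"
--
--     if len(views) > 3:
--         return "high_interest"
--
--     if len(searches) > 2:
--         return "exploring"
--
--     return "unknown"
-- ===== SOURCE B (Python) =====
-- def analyze_user(events):
--     views = searches = 0
--     for e in events:
--         t = e.get("type")
--         if t == "add_to_cart":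
--             return "cart_abandoned"
--         if t == "view":
--             views += 1
--         elif t == "search":
--             searches += 1
--     if views > 3:
--         return "high_interest"
--     if searches > 2:
--         return "exploring"
--     return "unknown"
-- ===== Notes on version B (the rewrite author's own statement) =====
-- stated objective: alternative
-- what changed: A makes three filtering passes building three intermediate lists and then tests their lengths; B is a single streaming pass with two scalar counters that returns 'cart_abandoned' immediately at the first add_to_cart event (short-circuit, no lists or tables built), deciding the remaining cases from the counters at the end.
import Mathlib
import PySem

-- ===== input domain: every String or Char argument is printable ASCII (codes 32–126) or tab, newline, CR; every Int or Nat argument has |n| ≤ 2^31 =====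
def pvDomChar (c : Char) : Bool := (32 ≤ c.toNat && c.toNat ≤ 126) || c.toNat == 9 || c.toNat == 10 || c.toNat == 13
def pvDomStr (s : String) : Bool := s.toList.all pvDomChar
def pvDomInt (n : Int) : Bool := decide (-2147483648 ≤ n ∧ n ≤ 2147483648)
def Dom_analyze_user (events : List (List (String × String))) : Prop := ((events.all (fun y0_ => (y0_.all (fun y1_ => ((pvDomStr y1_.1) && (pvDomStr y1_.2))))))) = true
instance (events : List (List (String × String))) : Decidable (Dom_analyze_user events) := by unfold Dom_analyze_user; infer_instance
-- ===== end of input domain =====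

-- B replaces A's three filtering passes (three intermediate lists) by one streaming pass with
-- two scalar counters and an immediate return at the first add_to_cart event: alternative structure.

-- ===== PORT A =====
-- e.get("type") on the event dict
def pvEventType (e : List (String × String)) : Option String :=
  (PySem.Dict.ofList e).get? "type"

def analyze_user (events : List (List (String × String))) : String :=
  let views := events.filter (fun e => pvEventType e == some "view")
  let cart := events.filter (fun e => pvEventType e == some "add_to_cart")
  let searches := events.filter (fun e => pvEventType e == some "search")
  if cart.length > 0 then "cart_abandoned"
  else if views.length > 3 then "high_interest"
  else if searches.length > 2 then "exploring"
  else "unknown"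

-- ===== PORT B =====
-- the loop of Source B: early return on add_to_cart, otherwise accumulate the two counters
def pvScan : List (List (String × String)) → Int → Int → String
  | [], views, searches =>
      if views > 3 then "high_interest"
      else if searches > 2 then "exploring"
      else "unknown"
  | e :: rest, views, searches =>
      let t := pvEventType e
      if t == some "add_to_cart" then "cart_abandoned"
      else if t == some "view" then pvScan rest (views + 1) searches
      else if t == some "search" then pvScan rest views (searches + 1)
      else pvScan rest views searches

def analyze_user_alt (events : List (List (String × String))) : String :=
  pvScan events 0 0

-- ===== PRECONDITION & SPEC =====
def Spec_analyze_user (events : List (List (String × String))) (out : String) : Prop := out = analyze_user_alt events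
instance (events : List (List (String × String))) (out : String) : Decidable (Spec_analyze_user events out) := by unfold Spec_analyze_user; infer_instance

-- ===== CLAIM (what is proved, stated in full; the proofs are below) =====
def Claim_equal_analyze_user : Prop := ∀ (events : List (List (String × String))), Dom_analyze_user events → Spec_analyze_user events (analyze_user events)

-- ===== LEMMAS AND PROOFS =====

-- characterisation of B's scan: cart short-circuit, otherwise counters plus filter lengths
theorem pvScan_eq (events : List (List (String × String))) :
    ∀ (v s : Int), pvScan events v s =
      if (events.filter (fun e => pvEventType e == some "add_to_cart")).length > 0 then "cart_abandoned"
      else if v + (events.filter (fun e => pvEventType e == some "view")).length > 3 then "high_interest"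
      else if s + (events.filter (fun e => pvEventType e == some "search")).length > 2 then "exploring"
      else "unknown" := by
  induction events with
  | nil => intro v s; simp [pvScan]
  | cons e rest ih =>
      intro v s
      by_cases hc : pvEventType e = some "add_to_cart"
      · simp [pvScan, hc]
      · by_cases hv : pvEventType e = some "view"
        · simp only [pvScan, hv, beq_iff_eq, if_true, List.filter_cons, ih]
          simp
          split_ifs <;> first | rfl | omega
        · by_cases hs : pvEventType e = some "search"
          · simp only [pvScan, hs, beq_iff_eq, if_true, List.filter_cons, ih]
            simp
            split_ifs <;> first | rfl | omega
          · simp only [pvScan, hc, hv, hs, beq_iff_eq, List.filter_cons, ih]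
            simp

-- ===== VERDICT (by name: the statement is the Claim_ definition above) =====
theorem analyze_user_spec : Claim_equal_analyze_user := by
  intro events _
  unfold Spec_analyze_user analyze_user analyze_user_alt
  rw [pvScan_eq]
  simp only [zero_add]
  split_ifs <;> first | rfl | omega
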